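-- pv_equiv track=rewrite | github.com/DonghakPark/TIL | Study_Algorithm/[na]1.py | solution
-- ===== SOURCE A (Python) =====
-- def solution(N,M,K,number):
--     answer = []
--     number.sort(reverse=True)
--
--     count = 0
--     while True:
--
--         if len(answer) == M:
--             break
--
--         if count == K:
--             answer.append(number[1])
--             count = 0
--         else:
--             answer.append(number[0])
--             count += 1
--
--     return sum(answer)
-- ===== SOURCE B (Python) =====
-- def solution(N, M, K, number):
--     # closed form over the top two values; no sort (NB: unlike A, leaves `number` unmodified)
--     if M <= 0:
--         return 0
--     a = max(number)
--     if K < 0 or K >= M: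
--         return M * a
--     rest = list(number)
--     rest.remove(a)
--     b = max(rest)
--     q = M // (K + 1)
--     return (M - q) * a + q * b
-- ===== Notes on version B (the rewrite author's own statement) =====
-- stated objective: faster
-- what changed: Replaces A's descending sort plus O(M) element-by-element greedy loop by an O(n) top-two extraction (max, remove one copy, max) and the closed form q = M // (K+1) picks of the second-largest, M - q of the largest; B does not mutate `number` (A sorts it in place) - the equivalence is about the return value.
import Mathlib
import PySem

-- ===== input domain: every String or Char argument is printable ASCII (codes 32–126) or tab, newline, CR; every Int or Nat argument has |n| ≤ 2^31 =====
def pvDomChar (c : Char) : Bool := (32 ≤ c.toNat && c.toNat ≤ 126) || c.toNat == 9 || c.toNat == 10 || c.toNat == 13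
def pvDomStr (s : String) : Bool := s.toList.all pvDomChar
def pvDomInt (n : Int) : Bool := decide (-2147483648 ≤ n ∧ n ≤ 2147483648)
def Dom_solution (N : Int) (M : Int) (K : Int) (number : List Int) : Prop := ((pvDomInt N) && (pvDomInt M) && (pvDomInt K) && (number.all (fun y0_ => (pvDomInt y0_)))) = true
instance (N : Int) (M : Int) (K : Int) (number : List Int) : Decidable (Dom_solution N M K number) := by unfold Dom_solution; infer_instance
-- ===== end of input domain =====

-- B replaces A's descending sort + O(M) greedy append loop by an O(n) top-two
-- extraction (max, remove one copy, max) and the closed form q = M // (K+1).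
-- A sorts `number` in place, B leaves it unmodified: equivalence is about the return value.

-- ===== PORT A =====
-- the while loop, fueled by M.toNat (one append per iteration; M < 0, where the
-- Python loop never terminates, is excluded by Pre_solution). `answer` is kept in
-- reverse (cons = Python's O(1) append) with its length `len` tracked (Python's
-- O(1) len); the loop returns answer.reverse, the list A builds.
def solLoopA (s : List Int) (M K : Int) (answer : List Int) (len count : Int) : Nat → List Int
  | 0 => answer.reverse
  | f + 1 =>
    if len = M then answer.reverse
    else if count = K then
      solLoopA s M K ((PySem.List.pyGet? s 1).getD 0 :: answer) (len + 1) 0 f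
    else
      solLoopA s M K ((PySem.List.pyGet? s 0).getD 0 :: answer) (len + 1) (count + 1) f

def solution (N : Int) (M : Int) (K : Int) (number : List Int) : Int :=
  let s := PySem.List.sorted number (fun x => x) true
  -- sum(answer): a left fold, as Python's sum loop (= List.sum; tail-safe to evaluate)
  (solLoopA s M K [] 0 0 M.toNat).foldl (· + ·) 0

-- ===== PORT B =====
def solution_alt (N : Int) (M : Int) (K : Int) (number : List Int) : Int :=
  if M ≤ 0 then 0
  else
    let a := (PySem.List.max? number (fun x => x)).getD 0
    if K < 0 ∨ K ≥ M then M * a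
    else
      let rest := (PySem.List.remove? number a).getD []
      let b := (PySem.List.max? rest (fun x => x)).getD 0
      let q := PySem.Int.floordiv M (K + 1)
      (M - q) * a + q * b

-- ===== PRECONDITION & SPEC =====
-- Pre_ excludes exactly where A does not return: M < 0 (the while loop never
-- terminates), M > 0 with an empty list (IndexError on number[0]), and
-- 0 ≤ K < M with fewer than 2 elements (IndexError on number[1]).
def Pre_solution (N : Int) (M : Int) (K : Int) (number : List Int) : Prop :=
  0 ≤ M ∧ (0 < M → number ≠ []) ∧ (0 ≤ K → K < M → 2 ≤ number.length)
instance (N : Int) (M : Int) (K : Int) (number : List Int) : Decidable (Pre_solution N M K number) := by unfold Pre_solution; infer_instance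

def pvWitness_solution : Int × Int × Int × List Int := (2, 6, 2, [3, 7])

def Spec_solution (N : Int) (M : Int) (K : Int) (number : List Int) (out : Int) : Prop := out = solution_alt N M K number
instance (N : Int) (M : Int) (K : Int) (number : List Int) (out : Int) : Decidable (Spec_solution N M K number out) := by unfold Spec_solution; infer_instance

-- ===== CLAIM (what is proved, stated in full; the proofs are below) =====
def Claim_equal_solution : Prop := ∀ (N : Int) (M : Int) (K : Int) (number : List Int), Dom_solution N M K number → Pre_solution N M K number → Spec_solution N M K number (solution N M K number)

-- ===== LEMMAS AND PROOFS =====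

-- when count can never reach K during the remaining f steps, every step appends s[0]
lemma solLoopA_all_a (s : List Int) (M K : Int) :
    ∀ (f : Nat) (answer : List Int) (len count : Int),
      (K < count ∨ count + f ≤ K) → len + f ≤ M →
      (solLoopA s M K answer len count f).sum
        = answer.sum + f * (PySem.List.pyGet? s 0).getD 0 := by
  intro f
  induction f with
  | zero => intro answer len count _ _; simp [solLoopA]
  | succ f ih =>
    intro answer len count h hlen
    have hne : len ≠ M := by omega
    have hcount : count ≠ K := by omega
    simp only [solLoopA, if_neg hne, if_neg hcount]
    rw [ih ((PySem.List.pyGet? s 0).getD 0 :: answer) (len + 1) (count + 1) (by omega) (by omega)]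
    simp
    ring

-- main invariant for 0 ≤ count ≤ K: among f appends, (count + f) // (K+1) are s[1]
lemma solLoopA_sum (s : List Int) (M K : Int) (hK : 0 ≤ K) :
    ∀ (f : Nat) (answer : List Int) (len count : Int),
      0 ≤ count → count ≤ K → len + f ≤ M →
      (solLoopA s M K answer len count f).sum
        = answer.sum + f * (PySem.List.pyGet? s 0).getD 0
            - ((count + f) / (K + 1)) * ((PySem.List.pyGet? s 0).getD 0 - (PySem.List.pyGet? s 1).getD 0) := by
  intro f
  induction f with
  | zero =>
    intro answer len count h0 h1 _
    have hz : count / (K + 1) = 0 := Int.ediv_eq_zero_of_lt h0 (by omega)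
    simp [solLoopA, hz]
  | succ f ih =>
    intro answer len count h0 h1 hlen
    have hne : len ≠ M := by omega
    simp only [solLoopA, if_neg hne]
    by_cases hc : count = K
    · simp only [if_pos hc]
      rw [ih ((PySem.List.pyGet? s 1).getD 0 :: answer) (len + 1) 0 le_rfl hK (by omega)]
      have hdiv : (count + ((f : Int) + 1)) / (K + 1) = (f : Int) / (K + 1) + 1 := by
        rw [hc, show K + ((f : Int) + 1) = (f : Int) + 1 * (K + 1) by ring,
            Int.add_mul_ediv_right _ _ (show K + 1 ≠ 0 by omega)]
      push_cast
      rw [hdiv]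
      simp
      ring
    · simp only [if_neg hc]
      rw [ih ((PySem.List.pyGet? s 0).getD 0 :: answer) (len + 1) (count + 1) (by omega) (by omega) (by omega)]
      have hdiv : (count + ((f : Int) + 1)) = ((count + 1) + (f : Int)) := by ring
      push_cast
      rw [hdiv]
      simp
      ring

-- ===== VERDICT (by name: the statement is the Claim_ definition above) =====
theorem solution_spec : Claim_equal_solution := by
  intro N M K number _ hPre
  obtain ⟨hM, hne, hlen2⟩ := hPre
  unfold Spec_solution solution solution_alt
  rw [← List.sum_eq_foldl]
  set s := PySem.List.sorted number (fun x => x) true with hs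
  by_cases hM0 : M ≤ 0
  · have : M = 0 := le_antisymm hM0 hM
    subst this
    simp [solLoopA]
  · have hM0' : 0 < M := by omega
    have hnum : number ≠ [] := hne hM0'
    have hfuel : (M.toNat : Int) = M := Int.toNat_of_nonneg hM
    -- head of the descending sort is the value max(number) returns
    have hperm : s.Perm number := PySem.List.sorted_perm number (fun x => x) true
    have hsne : s ≠ [] := by
      intro h
      exact hnum (h ▸ hperm).symm.eq_nil
    obtain ⟨m, t, hmt⟩ := List.exists_cons_of_ne_nil hsne
    have hm_mem : m ∈ number := hperm.mem_iff.mp (by simp [hmt])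
    have hmax : ∀ y ∈ number, y ≤ m := by
      exact PySem.List.key_head_sorted_rev_ge (xs := number) (key := fun x => x) (hs.symm.trans hmt)
    obtain ⟨v, hv⟩ : ∃ v, PySem.List.max? number (fun x => x) = some v := by
      cases h : PySem.List.max? number (fun x => x) with
      | none => exact absurd ((PySem.List.max?_eq_none_iff _ _).mp h) hnum
      | some v => exact ⟨v, rfl⟩
    have hvm : v = m :=
      le_antisymm (hmax v (PySem.List.max?_mem hv)) (PySem.List.max?_isMax hv m hm_mem)
    have hget0 : (PySem.List.pyGet? s 0).getD 0 = m := by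
      rw [hmt]; simp [PySem.List.pyGet?, PySem.List.pyIdx?]
    simp only [if_neg (by omega : ¬ M ≤ 0), hv, Option.getD_some, hvm]
    by_cases hKbig : K < 0 ∨ K ≥ M
    · rw [solLoopA_all_a s M K M.toNat [] 0 0 (by omega) (by omega), if_pos hKbig]
      simp [hfuel, hget0]
    · have hK0 : 0 ≤ K := by omega
      have hKM : K < M := by omega
      -- second element of the descending sort is max(number minus one copy of the max)
      have hlen : 2 ≤ number.length := hlen2 hK0 hKM
      have hslen : 2 ≤ s.length := by rw [hperm.length_eq]; exact hlen
      obtain ⟨m2, t2, ht2⟩ : ∃ m2 t2, t = m2 :: t2 := by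
        cases t with
        | nil => exfalso; rw [hmt] at hslen; simp at hslen
        | cons x xs => exact ⟨x, xs, rfl⟩
      have hget1 : (PySem.List.pyGet? s 1).getD 0 = m2 := by
        rw [hmt, ht2]; simp [PySem.List.pyGet?, PySem.List.pyIdx?]
      have hpw : s.Pairwise (fun a b => b ≤ a) := by
        have := PySem.List.sorted_pairwise_rev (xs := number) (key := fun x => x)
        exact this
      have hm2max : ∀ y ∈ t, y ≤ m2 := by
        rw [hmt, ht2] at hpw
        intro y hy
        rw [ht2] at hy
        rcases List.mem_cons.mp hy with rfl | hy2
        · exact le_rfl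
        · exact (List.pairwise_cons.mp (List.pairwise_cons.mp hpw).2).1 y hy2
      -- rest = number.erase m, a permutation of t
      have hrm : PySem.List.remove? number m = some (number.erase m) :=
        PySem.List.remove?_eq_some_erase number m hm_mem
      have hpermt : (number.erase m).Perm t := by
        have h1 : (number.erase m).Perm (s.erase m) := (hperm.erase m).symm
        rw [hmt, List.erase_cons_head] at h1
        exact h1
      have htne : t ≠ [] := by rw [ht2]; simp
      have hrne : number.erase m ≠ [] := by
        intro h
        exact htne ((h ▸ hpermt).symm.eq_nil)
      obtain ⟨w, hw⟩ : ∃ w, PySem.List.max? (number.erase m) (fun x => x) = some w := by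
        cases h : PySem.List.max? (number.erase m) (fun x => x) with
        | none => exact absurd ((PySem.List.max?_eq_none_iff _ _).mp h) hrne
        | some w => exact ⟨w, rfl⟩
      have hwm2 : w = m2 :=
        le_antisymm (hm2max w (hpermt.mem_iff.mp (PySem.List.max?_mem hw)))
          (PySem.List.max?_isMax hw m2 (hpermt.mem_iff.mpr (by rw [ht2]; simp)))
      simp only [if_neg hKbig, hrm, Option.getD_some, hw, hwm2]
      rw [solLoopA_sum s M K hK0 M.toNat [] 0 0 le_rfl hK0 (by omega)]
      rw [PySem.Int.floordiv_eq_ediv_of_pos (by omega)]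
      simp [hfuel, hget0, hget1]
      ring
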